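-- pv_equiv track=rewrite | github.com/PaulinhoRDC/LaboratoriosDeAlgoritmia-II | Torneios/Torneio1.py | buildingAdj
-- ===== SOURCE A (Python) =====
-- def buildingAdj (building):
--     adj = set()
--     for x,y in building:
--         if (x+1,y) not in building:
--             adj.add((x+1,y))
--
--         if (x-1,y) not in building:
--             adj.add((x-1,y))
--
--         if (x,y+1) not in building:
--             adj.add((x,y+1))
--
--         if (x,y-1) not in building:
--             adj.add((x,y-1))
--     return adj
-- ===== SOURCE B (Python) =====
-- def buildingAdj(building):
--     cells0 = list(building)
--     bset = set(cells0)
--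
--     def free(cell):
--         x, y = cell
--         return {(x + 1, y), (x - 1, y), (x, y + 1), (x, y - 1)} - bset
--
--     def go(cells):
--         # divide and conquer: free neighbours of each half, merged by union
--         if not cells:
--             return set()
--         if len(cells) == 1:
--             return free(cells[0])
--         mid = len(cells) // 2
--         return go(cells[:mid]) | go(cells[mid:])
--
--     return go(cells0)
-- ===== Notes on version B (the rewrite author's own statement) =====
-- stated objective: alternative
-- what changed: A is a single accumulating loop that tests each of the four neighbours against the building inline; B is a divide-and-conquer recursion that splits the cell list in halves, computes each half's free-neighbour set (a per-cell local set difference at the leaves) and merges the halves with set union.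
import Mathlib
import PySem

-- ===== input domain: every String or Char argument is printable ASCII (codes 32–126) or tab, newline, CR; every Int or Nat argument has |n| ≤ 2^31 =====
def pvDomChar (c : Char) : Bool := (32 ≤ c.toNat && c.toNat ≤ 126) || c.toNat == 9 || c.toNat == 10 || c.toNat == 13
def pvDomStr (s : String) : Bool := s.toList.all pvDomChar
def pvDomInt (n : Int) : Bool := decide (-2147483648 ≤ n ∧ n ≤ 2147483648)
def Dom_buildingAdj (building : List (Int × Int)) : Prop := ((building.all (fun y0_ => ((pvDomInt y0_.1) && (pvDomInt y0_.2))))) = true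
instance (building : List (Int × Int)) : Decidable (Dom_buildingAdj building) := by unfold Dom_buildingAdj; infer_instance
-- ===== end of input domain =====

-- B replaces A's single accumulating loop (inline membership test per neighbour) by a
-- divide-and-conquer recursion: split the cell list in halves, compute each half's
-- free-neighbour set (per-cell set difference at the leaves), merge with set union
-- (objective: alternative decomposition).

-- ===== PORT A =====
def buildingAdj (building : List (Int × Int)) : List (Int × Int) :=
  building.foldl (fun adj xy =>
    let x := xy.1
    let y := xy.2
    let adj := if building.contains (x + 1, y) then adj else PySem.Set.add adj (x + 1, y)
    let adj := if building.contains (x - 1, y) then adj else PySem.Set.add adj (x - 1, y)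
    let adj := if building.contains (x, y + 1) then adj else PySem.Set.add adj (x, y + 1)
    if building.contains (x, y - 1) then adj else PySem.Set.add adj (x, y - 1))
    PySem.Set.empty

-- ===== PORT B =====
-- free(cell): the four neighbours of one cell minus the building set (local set difference)
def pvFree (bset : PySem.Set (Int × Int)) (c : Int × Int) : PySem.Set (Int × Int) :=
  PySem.Set.diff
    (PySem.Set.ofList [(c.1 + 1, c.2), (c.1 - 1, c.2), (c.1, c.2 + 1), (c.1, c.2 - 1)]) bset

-- go(cells): divide and conquer — halve, recurse, merge by set union
def pvGo (bset : PySem.Set (Int × Int)) (cells : List (Int × Int)) : PySem.Set (Int × Int) :=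
  if cells = [] then PySem.Set.empty
  else if cells.length = 1 then pvFree bset cells.headI
  else
    PySem.Set.union
      (pvGo bset (PySem.List.slice cells none (some ((cells.length / 2 : Nat) : Int))))
      (pvGo bset (PySem.List.slice cells (some ((cells.length / 2 : Nat) : Int)) none))
  termination_by cells.length
  decreasing_by
    · rw [PySem.List.slice_to_natCast]
      rename_i h0 h1
      have : cells.length ≠ 0 := by simpa using h0
      simp only [List.length_take]
      omega
    · rw [PySem.List.slice_from_natCast]
      rename_i h0 h1
      have : cells.length ≠ 0 := by simpa using h0
      simp only [List.length_drop]
      omega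

def buildingAdj_alt (building : List (Int × Int)) : List (Int × Int) :=
  pvGo (PySem.Set.ofList building) building

-- ===== PRECONDITION & SPEC =====
def Spec_buildingAdj (building : List (Int × Int)) (out : List (Int × Int)) : Prop := out = buildingAdj_alt building
instance (building : List (Int × Int)) (out : List (Int × Int)) : Decidable (Spec_buildingAdj building out) := by unfold Spec_buildingAdj; infer_instance

-- ===== CLAIM (what is proved, stated in full; the proofs are below) =====
def Claim_equal_buildingAdj : Prop := ∀ (building : List (Int × Int)), Dom_buildingAdj building → Spec_buildingAdj building (buildingAdj building)

-- ===== LEMMAS AND PROOFS =====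

-- A's loop body, named (definitionally equal to the lambda in the port of A)
def pvStepA (building : List (Int × Int)) (adj : PySem.Set (Int × Int)) (xy : Int × Int) :
    PySem.Set (Int × Int) :=
  let x := xy.1
  let y := xy.2
  let adj := if building.contains (x + 1, y) then adj else PySem.Set.add adj (x + 1, y)
  let adj := if building.contains (x - 1, y) then adj else PySem.Set.add adj (x - 1, y)
  let adj := if building.contains (x, y + 1) then adj else PySem.Set.add adj (x, y + 1)
  if building.contains (x, y - 1) then adj else PySem.Set.add adj (x, y - 1)

-- the free neighbours of a cell as a plain list (both programs produce it)
def pvLc (building : List (Int × Int)) (c : Int × Int) : List (Int × Int) :=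
  [(c.1 + 1, c.2), (c.1 - 1, c.2), (c.1, c.2 + 1), (c.1, c.2 - 1)].filter
    (fun n => !building.contains n)

theorem pvNbrs_nodup (c : Int × Int) :
    List.Nodup [(c.1 + 1, c.2), (c.1 - 1, c.2), (c.1, c.2 + 1), (c.1, c.2 - 1)] := by
  simp [List.nodup_cons, Prod.ext_iff]
  omega

-- union of two ofList-sets is ofList of the concatenation
theorem union_ofList_ofList {α : Type} [BEq α] [LawfulBEq α] (m w : List α) :
    PySem.Set.union (PySem.Set.ofList m) (PySem.Set.ofList w)
      = PySem.Set.ofList (m ++ w) := by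
  show PySem.Set.update (PySem.Set.ofList m) (PySem.Set.ofList w) = _
  rw [PySem.Set.ofList_append, PySem.Set.update_eq_append_filter,
    PySem.Set.update_eq_append_filter, PySem.Set.ofList_ofList]

-- pvFree is the ofList of the filtered neighbour list
theorem pvFree_eq (building : List (Int × Int)) (c : Int × Int) :
    pvFree (PySem.Set.ofList building) c = PySem.Set.ofList (pvLc building c) := by
  unfold pvFree pvLc
  rw [PySem.Set.ofList_eq_self_of_nodup _ (pvNbrs_nodup c)]
  show List.filter _ _ = _
  have hf : List.filter (fun x => !(PySem.Set.ofList building).contains x)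
      [(c.1 + 1, c.2), (c.1 - 1, c.2), (c.1, c.2 + 1), (c.1, c.2 - 1)]
      = List.filter (fun n => !building.contains n)
      [(c.1 + 1, c.2), (c.1 - 1, c.2), (c.1, c.2 + 1), (c.1, c.2 - 1)] := by
    apply List.filter_congr
    intro x _
    have : (PySem.Set.ofList building).contains x = building.contains x := by
      simp [PySem.Set.mem_ofList]
    rw [this]
  rw [hf, PySem.Set.ofList_eq_self_of_nodup]
  exact (pvNbrs_nodup c).filter _

-- B computes ofList of the flattened free-neighbour lists (strong induction on length)
theorem pvGo_eq (building : List (Int × Int)) :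
    ∀ (n : Nat) (cells : List (Int × Int)), cells.length ≤ n →
      pvGo (PySem.Set.ofList building) cells
        = PySem.Set.ofList (cells.flatMap (pvLc building)) := by
  intro n
  induction n with
  | zero =>
      intro cells hn
      have : cells = [] := List.eq_nil_of_length_eq_zero (Nat.le_zero.1 hn)
      subst this
      rw [pvGo]
      simp [PySem.Set.empty]
  | succ k ih =>
      intro cells hn
      rw [pvGo]
      by_cases h0 : cells = []
      · subst h0; simp [PySem.Set.empty]
      · by_cases h1 : cells.length = 1
        · obtain ⟨c, hc⟩ : ∃ c, cells = [c] := by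
            match cells, h1 with
            | [c], _ => exact ⟨c, rfl⟩
          subst hc
          simp only [h0, h1, if_false, if_true, List.headI]
          simpa using pvFree_eq building c
        · have hlen : 2 ≤ cells.length := by
            rcases cells with _ | ⟨a, _ | ⟨b, t⟩⟩ <;> simp_all
          simp only [h0, h1, if_false]
          rw [PySem.List.slice_to_natCast, PySem.List.slice_from_natCast,
            ih _ (by simp [List.length_take]; omega),
            ih _ (by simp [List.length_drop]; omega),
            union_ofList_ofList, ← List.flatMap_append, List.take_append_drop]

-- A's loop step adds exactly the free neighbours of one cell
theorem stepA_eq (building m : List (Int × Int)) (c : Int × Int) :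
    pvStepA building (PySem.Set.ofList m) c = PySem.Set.ofList (m ++ pvLc building c) := by
  unfold pvStepA pvLc
  by_cases h1 : (c.1 + 1, c.2) ∈ building <;>
    by_cases h2 : (c.1 - 1, c.2) ∈ building <;>
      by_cases h3 : (c.1, c.2 + 1) ∈ building <;>
        by_cases h4 : (c.1, c.2 - 1) ∈ building <;>
          simp [h1, h2, h3, h4, List.filter, PySem.Set.ofList_append, PySem.Set.update]

-- A computes the same ofList, by the loop invariant
theorem foldA_eq (building : List (Int × Int)) :
    ∀ (cells m : List (Int × Int)),
      cells.foldl (pvStepA building) (PySem.Set.ofList m)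
        = PySem.Set.ofList (m ++ cells.flatMap (pvLc building)) := by
  intro cells
  induction cells with
  | nil => intro m; simp
  | cons c cs ih =>
      intro m
      rw [List.foldl_cons, stepA_eq building m c, ih, List.flatMap_cons, List.append_assoc]

-- ===== VERDICT (by name: the statement is the Claim_ definition above) =====
theorem buildingAdj_spec : Claim_equal_buildingAdj := by
  intro building _
  unfold Spec_buildingAdj buildingAdj_alt
  show building.foldl (pvStepA building) PySem.Set.empty = _
  rw [pvGo_eq building building.length building (le_refl _)]
  simpa using foldA_eq building building []
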